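-- pv_equiv track=rewrite | github.com/BenMabroukAya/Crypto | Transpo.py | getTransposition
-- ===== SOURCE A (Python) =====
-- alphabet="abcdefghijklmnopqrstuvwxyz"
--
-- def getTransposition(cle):
-- 	alphabet.lower()
-- 	cle=cle.lower()
-- 	ch=''
-- 	for c in alphabet:
-- 		for i in cle:
-- 			if i==c:
-- 				ch+=i
-- 	tr=[]
-- 	for i in  range (len(ch)):
-- 		tr.append(ch.index(cle[i]))
-- 		ch=ch.replace(cle[i],'#',1)
-- 	return tr
-- ===== SOURCE B (Python) =====
-- alphabet = "abcdefghijklmnopqrstuvwxyz"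
--
-- def getTransposition(cle):
--     cle = cle.lower()
--     cnt = {}
--     for c in cle:
--         if c.isalpha():
--             cnt[c] = cnt.get(c, 0) + 1
--     start = {}
--     total = 0
--     for c in alphabet:
--         start[c] = total
--         total += cnt.get(c, 0)
--     tr = []
--     for c in cle[:total]:
--         tr.append(start[c])  # KeyError: the rank table only holds letters
--         start[c] += 1
--     return tr
-- ===== Notes on version B (the rewrite author's own statement) =====
-- stated objective: faster
-- what changed: A ranks each key letter by repeated linear ch.index scans plus a replace-first pass over a bucketed copy of the key (quadratic); B is a counting sort: one counting pass over the key, a 26-entry prefix-sum table of starting ranks, then one pass over the ranked prefix emitting and bumping each letter's next rank.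
-- outside the precondition, e.g. on getTransposition('a#b'): A returns [0, 0], B raises KeyError; on getTransposition('ux#o'): A returns [1, 2, 1], B raises KeyError
import Mathlib
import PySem

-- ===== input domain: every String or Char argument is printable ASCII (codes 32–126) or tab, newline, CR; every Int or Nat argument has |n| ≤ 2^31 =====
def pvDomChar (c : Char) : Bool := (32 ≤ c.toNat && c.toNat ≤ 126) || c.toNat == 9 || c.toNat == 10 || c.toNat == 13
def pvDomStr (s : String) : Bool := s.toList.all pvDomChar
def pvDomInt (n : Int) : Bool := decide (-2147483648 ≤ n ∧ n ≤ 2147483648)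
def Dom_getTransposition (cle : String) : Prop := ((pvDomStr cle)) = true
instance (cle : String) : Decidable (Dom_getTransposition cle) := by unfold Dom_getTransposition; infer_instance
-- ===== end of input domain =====

-- B replaces A's quadratic index/replace scans by a counting sort over the fixed alphabet (O(n)).

-- ===== PORT A =====
-- the module constant alphabet
def pyAlphabet : List Char := "abcdefghijklmnopqrstuvwxyz".toList

-- exact port of str.replace(old, new, 1) for a single-character old/new: replace the first occurrence
def replace1 : List Char → Char → Char → List Char
  | [], _, _ => []
  | x :: xs, old, new => if x == old then new :: xs else x :: replace1 xs old new

def getTransposition (cle : String) : List Int :=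
  let s := PySem.Chars.lower cle.toList
  -- ch built letter by letter: for c in alphabet: for i in cle: if i==c: ch+=i
  let ch0 := pyAlphabet.foldl (fun ch c => s.foldl (fun ch i => if i == c then ch ++ [i] else ch) ch) []
  -- for i in range(len(ch)): tr.append(ch.index(cle[i])); ch = ch.replace(cle[i],'#',1)
  -- ch.index for a single-character needle is List index?; none = ValueError (the state goes none, outside Pre_)
  let res := (List.range ch0.length).foldl
      (fun (st : Option (List Int × List Char)) (k : Nat) =>
        st.bind fun p =>
          match PySem.List.pyGet? s (k : Int) with
          | none => none
          | some c =>
            match PySem.List.index? p.2 c with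
            | none => none
            | some j => some (p.1 ++ [(j : Int)], replace1 p.2 c '#'))
      (some ([], ch0))
  (res.map (·.1)).getD []

-- ===== PORT B =====
def getTransposition_alt (cle : String) : List Int :=
  let s := PySem.Chars.lower cle.toList
  -- if c.isalpha(): cnt[c] = cnt.get(c, 0) + 1
  let cnt := s.foldl (fun d c => if PySem.Chars.isalpha c then d.insert c (d.getD c 0 + 1) else d)
      (PySem.Dict.empty : PySem.Dict Char Int)
  -- for c in alphabet: start[c] = total; total += cnt.get(c, 0)
  let st := pyAlphabet.foldl (fun (p : PySem.Dict Char Int × Int) c =>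
      (p.1.insert c p.2, p.2 + cnt.getD c 0)) ((PySem.Dict.empty : PySem.Dict Char Int), 0)
  -- for c in cle[:total]: tr.append(start[c]); start[c] += 1   (start[c] raises KeyError on a non-letter)
  let res := (PySem.List.slice s none (some st.2)).foldl
      (fun (p : List Int × PySem.Dict Char Int) c =>
        match p.2.get? c with
        | none => p                      -- Python raises KeyError here; unreachable under Pre_
        | some v => (p.1 ++ [v], p.2.insert c (v + 1)))
      ([], st.1)
  res.1

-- ===== PRECONDITION & SPEC =====
-- Pre_ = exactly B's return domain: each of the first L (lowercased) key characters is a letter, where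
-- L is the number of letters in the key (A and B both read only those first L characters and both raise
-- beyond this domain), EXCEPT that A also returns when a hash mark sits among the first L characters
-- after a letter (it then reports the first struck cell of its working string); B raises KeyError there
-- (see the cited examples).
def Pre_getTransposition (cle : String) : Prop :=
  ((PySem.Chars.lower cle.toList).take
      ((PySem.Chars.lower cle.toList).filter PySem.Chars.isalpha).length).all PySem.Chars.isalpha = true
instance (cle : String) : Decidable (Pre_getTransposition cle) := by unfold Pre_getTransposition; infer_instance
def pvWitness_getTransposition : String := "Banana"

def Spec_getTransposition (cle : String) (out : List Int) : Prop := out = getTransposition_alt cle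
instance (cle : String) (out : List Int) : Decidable (Spec_getTransposition cle out) := by unfold Spec_getTransposition; infer_instance

-- ===== CLAIM (what is proved, stated in full; the proofs are below) =====
def Claim_equal_getTransposition : Prop := ∀ (cle : String), Dom_getTransposition cle → Pre_getTransposition cle → Spec_getTransposition cle (getTransposition cle)


-- ===== LEMMAS AND PROOFS =====

-- The common value both programs compute: the k-th output is
-- (number of key letters alphabetically before c) + (occurrences of c among the first k ranked characters),
-- where c is the k-th (lowercased) key character.
def offs (s : List Char) (c : Char) : Nat :=
  ((pyAlphabet.takeWhile (fun a => a != c)).map (fun a => s.count a)).sum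

def ranksAux (s : List Char) : List Char → List Char → List Int
  | _, [] => []
  | p, c :: r => ((offs s c + p.count c : Nat) : Int) :: ranksAux s (p ++ [c]) r

-- A's working string ch after the characters of p have been processed (letters struck out with '#')
def bucket (s p : List Char) (c : Char) : List Char :=
  List.replicate (p.count c) '#' ++ List.replicate (s.count c - p.count c) c

def mask (s p : List Char) : List Char := pyAlphabet.flatMap (bucket s p)

lemma pyAlphabet_nodup : pyAlphabet.Nodup := by decide

lemma pyAlphabet_no_hash : '#' ∉ pyAlphabet := by decide

set_option maxRecDepth 4000 in
lemma pyAlphabet_all_isalpha : pyAlphabet.all PySem.Chars.isalpha = true := by decide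

lemma mem_alpha_isalpha : ∀ c ∈ pyAlphabet, PySem.Chars.isalpha c = true :=
  List.all_eq_true.mp pyAlphabet_all_isalpha

set_option maxRecDepth 2000 in
lemma lowerChar_mem_alpha (c : Char) (h : PySem.Chars.isalpha (PySem.Chars.lowerChar c) = true) :
    PySem.Chars.lowerChar c ∈ pyAlphabet := by
  have hmem' : ∀ n ∈ List.range' 97 26, Char.ofNat n ∈ pyAlphabet := by decide
  have hmem : ∀ n : Nat, 97 ≤ n → n ≤ 122 → Char.ofNat n ∈ pyAlphabet := by
    intro n h1 h2
    exact hmem' n (List.mem_range'_1.mpr ⟨by omega, by omega⟩)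
  unfold PySem.Chars.lowerChar at h ⊢
  by_cases hu : PySem.Chars.isupper c = true
  · rw [if_pos hu] at h ⊢
    unfold PySem.Chars.isupper at hu
    obtain ⟨ha, hb⟩ := Bool.and_eq_true_iff.mp hu
    have h1 : (65:Nat) ≤ c.toNat := of_decide_eq_true ha
    have h2 : c.toNat ≤ (90:Nat) := of_decide_eq_true hb
    exact hmem (c.toNat + 32) (by omega) (by omega)
  · rw [if_neg hu] at h ⊢
    unfold PySem.Chars.isalpha at h
    rcases Bool.or_eq_true_iff.mp h with h' | h'
    · exact absurd h' hu
    · unfold PySem.Chars.islower at h'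
      obtain ⟨ha, hb⟩ := Bool.and_eq_true_iff.mp h'
      have h1 : (97:Nat) ≤ c.toNat := of_decide_eq_true ha
      have h2 : c.toNat ≤ (122:Nat) := of_decide_eq_true hb
      have := hmem c.toNat h1 h2
      rwa [Char.ofNat_toNat] at this

-- ----- A side -----

lemma ch0_eq (s : List Char) :
    pyAlphabet.foldl (fun ch c => s.foldl (fun ch i => if i == c then ch ++ [i] else ch) ch) []
      = mask s [] := by
  rw [PySem.List.foldl_congr_mem pyAlphabet _ (fun ch c => ch ++ s.filter (· == c)) []
      (fun acc c _ => PySem.List.foldl_append_if_eq_filter (· == c) s acc)]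
  rw [PySem.List.foldl_append_eq_flatMap]
  have : (fun c => s.filter (· == c)) = bucket s [] := by
    funext c; simp [bucket, List.filter_beq]
  simp [mask, this]

lemma bucket_length (s p : List Char) (c : Char) (h : p.count c ≤ s.count c) :
    (bucket s p c).length = s.count c := by
  simp [bucket]; omega

-- a 0/1 indicator sum over a duplicate-free list is a membership test
lemma sum_if_mem (x : Char) : ∀ (L : List Char), L.Nodup →
    (L.map (fun c => if x == c then 1 else 0)).sum = if x ∈ L then 1 else 0 := by
  intro L
  induction L with
  | nil => simp
  | cons a L ih =>
    intro hnd
    rw [List.nodup_cons] at hnd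
    simp only [List.map_cons, List.sum_cons]
    by_cases hxa : x = a
    · subst hxa
      rw [if_pos (beq_self_eq_true x), if_pos List.mem_cons_self]
      have hzero : (L.map (fun c => if x == c then 1 else 0)).sum = 0 := by
        apply List.sum_eq_zero
        intro y hy
        obtain ⟨c, hc, hyc⟩ := List.mem_map.mp hy
        rw [← hyc, if_neg (by simp; intro h; exact hnd.1 (h ▸ hc))]
      omega
    · rw [if_neg (by simp [hxa]), ih hnd.2]
      by_cases hxL : x ∈ L
      · rw [if_pos hxL, if_pos (List.mem_cons_of_mem _ hxL)]
      · rw [if_neg hxL, if_neg (by simp [hxa, hxL])]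

-- the total number of bucketed characters is the number of characters drawn from the alphabet
lemma sum_count (s : List Char) :
    (pyAlphabet.map (fun c => s.count c)).sum
      = (s.filter (fun c => decide (c ∈ pyAlphabet))).length := by
  induction s with
  | nil => simp
  | cons x s ih =>
    rw [List.map_congr_left (g := fun c => s.count c + if x == c then 1 else 0)
      (fun c _ => List.count_cons ..), List.sum_map_add, ih,
      sum_if_mem x pyAlphabet pyAlphabet_nodup]
    by_cases hx : x ∈ pyAlphabet
    · rw [List.filter_cons_of_pos (by simp [hx]), List.length_cons, if_pos hx]
    · rw [List.filter_cons_of_neg (by simp [hx]), if_neg hx]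
      omega

lemma mask_nil_length (s : List Char) (hiff : ∀ c ∈ s, decide (c ∈ pyAlphabet) = PySem.Chars.isalpha c) :
    (mask s []).length = (s.filter PySem.Chars.isalpha).length := by
  rw [mask, List.length_flatMap,
    List.map_congr_left (g := fun c => s.count c) (fun c _ => bucket_length s [] c (by simp)),
    sum_count s, List.filter_congr hiff]

lemma dropWhile_ne_of_mem {c : Char} {l : List Char} (h : c ∈ l) :
    ∃ dt, l.dropWhile (fun a => a != c) = c :: dt := by
  induction l with
  | nil => cases h
  | cons a l ih =>
    by_cases hac : a = c
    · subst hac; exact ⟨l, by simp⟩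
    · have hmem : c ∈ l := by
        rcases List.mem_cons.mp h with h' | h'
        · exact absurd h'.symm hac
        · exact h'
      obtain ⟨dt, hdt⟩ := ih hmem
      exact ⟨dt, by rw [List.dropWhile_cons, if_pos (bne_iff_ne.mpr hac)]; exact hdt⟩

-- the decomposition of mask s p around the bucket of c₀
lemma mask_split (s p : List Char) (c₀ : Char) {dt : List Char}
    (hdt : pyAlphabet.dropWhile (fun a => a != c₀) = c₀ :: dt)
    (hlt : p.count c₀ < s.count c₀) :
    mask s p =
      ((pyAlphabet.takeWhile (fun a => a != c₀)).flatMap (bucket s p)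
          ++ List.replicate (p.count c₀) '#')
        ++ c₀ :: (List.replicate (s.count c₀ - p.count c₀ - 1) c₀
          ++ dt.flatMap (bucket s p)) := by
  conv_lhs => rw [mask, ← List.takeWhile_append_dropWhile (p := fun a => a != c₀) (l := pyAlphabet), hdt]
  rw [List.flatMap_append, List.flatMap_cons]
  have hb : bucket s p c₀ =
      List.replicate (p.count c₀) '#' ++ c₀ :: List.replicate (s.count c₀ - p.count c₀ - 1) c₀ := by
    unfold bucket
    congr 1
    have hn : s.count c₀ - p.count c₀ = (s.count c₀ - p.count c₀ - 1) + 1 := by omega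
    conv_lhs => rw [hn, List.replicate_succ]
  rw [hb]
  simp [List.append_assoc]

lemma not_mem_maskPre (s p : List Char) (c₀ : Char) (hc : c₀ ∈ pyAlphabet) :
    c₀ ∉ (pyAlphabet.takeWhile (fun a => a != c₀)).flatMap (bucket s p)
          ++ List.replicate (p.count c₀) '#' := by
  intro hmem
  rcases List.mem_append.mp hmem with h | h
  · obtain ⟨a, ha, hx⟩ := List.mem_flatMap.mp h
    have hane : (a != c₀) = true := List.mem_takeWhile_imp (p := fun a => a != c₀) ha
    rcases List.mem_append.mp hx with h' | h'
    · exact pyAlphabet_no_hash (List.eq_of_mem_replicate h' ▸ hc)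
    · exact (bne_iff_ne.mp hane) (List.eq_of_mem_replicate h').symm
  · exact pyAlphabet_no_hash (List.eq_of_mem_replicate h ▸ hc)

lemma maskPre_length (s p : List Char) (c₀ : Char)
    (hcount : ∀ c, p.count c ≤ s.count c) :
    ((pyAlphabet.takeWhile (fun a => a != c₀)).flatMap (bucket s p)
        ++ List.replicate (p.count c₀) '#').length = offs s c₀ + p.count c₀ := by
  rw [List.length_append, List.length_replicate, List.length_flatMap,
    List.map_congr_left (g := fun a => s.count a) (fun a _ => bucket_length s p a (hcount a))]
  rfl

lemma index?_mask (s p : List Char) (c₀ : Char) (hc : c₀ ∈ pyAlphabet)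
    (hcount : ∀ c, p.count c ≤ s.count c) (hlt : p.count c₀ < s.count c₀) :
    PySem.List.index? (mask s p) c₀ = some (offs s c₀ + p.count c₀) := by
  obtain ⟨dt, hdt⟩ := dropWhile_ne_of_mem hc
  exact (PySem.List.index?_eq_some_iff _ _ _).mpr
    ⟨_, _, mask_split s p c₀ hdt hlt, maskPre_length s p c₀ hcount, not_mem_maskPre s p c₀ hc⟩

lemma replace1_append {pre l : List Char} {c n : Char} (h : c ∉ pre) :
    replace1 (pre ++ l) c n = pre ++ replace1 l c n := by
  induction pre with
  | nil => rfl
  | cons x pre ih =>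
    have hx : (x == c) = false := beq_false_of_ne (fun h' => h (h' ▸ List.mem_cons_self))
    simp [List.cons_append, replace1, hx, ih (fun h' => h (List.mem_cons_of_mem _ h'))]

lemma flatMap_bucket_congr (s p : List Char) (c₀ : Char) {L : List Char}
    (h : ∀ a ∈ L, a ≠ c₀) :
    L.flatMap (bucket s (p ++ [c₀])) = L.flatMap (bucket s p) := by
  rw [List.flatMap, List.flatMap,
    List.map_congr_left (g := bucket s p) (fun a ha => by
      unfold bucket
      rw [List.count_append, List.count_singleton, if_neg (by simp [beq_false_of_ne (h a ha).symm]),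
        Nat.add_zero])]

lemma replace_mask (s p : List Char) (c₀ : Char) (hc : c₀ ∈ pyAlphabet)
    (hlt : p.count c₀ < s.count c₀) :
    replace1 (mask s p) c₀ '#' = mask s (p ++ [c₀]) := by
  obtain ⟨dt, hdt⟩ := dropWhile_ne_of_mem hc
  have htw : ∀ a ∈ pyAlphabet.takeWhile (fun a => a != c₀), a ≠ c₀ :=
    fun a ha => bne_iff_ne.mp (List.mem_takeWhile_imp (p := fun a => a != c₀) ha)
  have hdtne : ∀ a ∈ dt, a ≠ c₀ := by
    have hnd := pyAlphabet_nodup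
    rw [← List.takeWhile_append_dropWhile (p := fun a => a != c₀) (l := pyAlphabet), hdt] at hnd
    have := (List.nodup_append.mp hnd).2.1
    rw [List.nodup_cons] at this
    exact fun a ha h' => this.1 (h' ▸ ha)
  rw [mask_split s p c₀ hdt hlt,
    replace1_append (not_mem_maskPre s p c₀ hc)]
  have hstep : replace1 (c₀ :: (List.replicate (s.count c₀ - p.count c₀ - 1) c₀
      ++ dt.flatMap (bucket s p))) c₀ '#'
      = '#' :: (List.replicate (s.count c₀ - p.count c₀ - 1) c₀ ++ dt.flatMap (bucket s p)) := by
    simp [replace1]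
  rw [hstep]
  have hcount' : (p ++ [c₀]).count c₀ = p.count c₀ + 1 := by
    simp [List.count_append]
  conv_rhs => rw [mask, ← List.takeWhile_append_dropWhile (p := fun a => a != c₀) (l := pyAlphabet), hdt]
  rw [List.flatMap_append, List.flatMap_cons,
    flatMap_bucket_congr s p c₀ htw, flatMap_bucket_congr s p c₀ hdtne]
  have hb : bucket s (p ++ [c₀]) c₀
      = (List.replicate (p.count c₀) '#' ++ ['#']) ++ List.replicate (s.count c₀ - p.count c₀ - 1) c₀ := by
    unfold bucket
    rw [hcount', ← List.replicate_succ', show s.count c₀ - (p.count c₀ + 1) = s.count c₀ - p.count c₀ - 1 by omega]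
  rw [hb]
  simp [List.append_assoc]

lemma loopA (s : List Char) :
    ∀ (r p rest : List Char) (acc : List Int), s = p ++ r ++ rest → (∀ c ∈ r, c ∈ pyAlphabet) →
    (List.range' p.length r.length).foldl
      (fun (st : Option (List Int × List Char)) (k : Nat) =>
        st.bind fun q =>
          match PySem.List.pyGet? s (k : Int) with
          | none => none
          | some c =>
            match PySem.List.index? q.2 c with
            | none => none
            | some j => some (q.1 ++ [(j : Int)], replace1 q.2 c '#'))
      (some (acc, mask s p))
    = some (acc ++ ranksAux s p r, mask s (p ++ r)) := by
  intro r
  induction r with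
  | nil => intro p rest acc hsp _; simp [ranksAux]
  | cons c₀ r' ih =>
    intro p rest acc hsp hr
    have hcount : ∀ c, p.count c ≤ s.count c := by
      intro c; rw [hsp, List.count_append, List.count_append]; omega
    have hlt : p.count c₀ < s.count c₀ := by
      rw [hsp, List.count_append, List.count_append, List.count_cons_self]; omega
    have hc : c₀ ∈ pyAlphabet := hr c₀ List.mem_cons_self
    rw [List.length_cons, List.range'_succ, List.foldl_cons]
    have hget : PySem.List.pyGet? s ((p.length : Nat) : Int) = some c₀ := by
      rw [hsp, show p ++ (c₀ :: r') ++ rest = p ++ (c₀ :: (r' ++ rest)) by simp]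
      exact PySem.List.pyGet?_append_length p (r' ++ rest) c₀
    simp only [Option.bind_some, hget, index?_mask s p c₀ hc hcount hlt,
      replace_mask s p c₀ hc hlt]
    have hsp' : s = (p ++ [c₀]) ++ r' ++ rest := by rw [hsp]; simp
    have hih := ih (p ++ [c₀]) rest (acc ++ [((offs s c₀ + p.count c₀ : Nat) : Int)]) hsp'
      (fun c hcr => hr c (List.mem_cons_of_mem _ hcr))
    rw [List.length_append, List.length_singleton] at hih
    rw [hih, show (p ++ [c₀]) ++ r' = p ++ (c₀ :: r') by simp, ranksAux]
    simp [List.append_assoc]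

-- ----- B side -----

lemma startFold_not_mem (cnt : PySem.Dict Char Int) :
    ∀ (L : List Char) (c : Char), c ∉ L → ∀ (d : PySem.Dict Char Int) (t : Int),
    ((L.foldl (fun p a => (p.1.insert a p.2, p.2 + cnt.getD a 0)) (d, t)).1).get? c = d.get? c := by
  intro L
  induction L with
  | nil => intro c _ d t; rfl
  | cons a L ih =>
    intro c hc d t
    rw [List.foldl_cons]
    rw [ih c (fun h => hc (List.mem_cons_of_mem _ h))]
    exact PySem.Dict.get?_insert_of_ne d t (fun h => hc (h ▸ List.mem_cons_self))

lemma startFold (cnt : PySem.Dict Char Int) :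
    ∀ (L : List Char), L.Nodup → ∀ (c : Char), c ∈ L → ∀ (d : PySem.Dict Char Int) (t : Int),
    ((L.foldl (fun p a => (p.1.insert a p.2, p.2 + cnt.getD a 0)) (d, t)).1).get? c
      = some (t + ((L.takeWhile (fun a => a != c)).map (fun a => cnt.getD a 0)).sum) := by
  intro L
  induction L with
  | nil => intro _ c hc; cases hc
  | cons a L ih =>
    intro hnd c hc d t
    rw [List.nodup_cons] at hnd
    by_cases hac : a = c
    · subst hac
      rw [List.foldl_cons, startFold_not_mem cnt L a hnd.1,
        PySem.Dict.get?_insert_self]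
      simp
    · have hcL : c ∈ L := by
        rcases List.mem_cons.mp hc with h' | h'
        · exact absurd h'.symm hac
        · exact h'
      rw [List.foldl_cons, ih hnd.2 c hcL]
      rw [List.takeWhile_cons, if_pos (by simp [bne, beq_false_of_ne hac])]
      simp [add_assoc]

lemma startFold_snd (cnt : PySem.Dict Char Int) :
    ∀ (L : List Char) (d : PySem.Dict Char Int) (t : Int),
    ((L.foldl (fun p a => (p.1.insert a p.2, p.2 + cnt.getD a 0)) (d, t)).2)
      = t + (L.map (fun a => cnt.getD a 0)).sum := by
  intro L
  induction L with
  | nil => intro d t; simp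
  | cons a L ih =>
    intro d t
    rw [List.foldl_cons, ih]
    simp [add_assoc]

lemma loopB (s : List Char) :
    ∀ (r p : List Char) (acc : List Int) (d : PySem.Dict Char Int),
    (∀ c ∈ r, d.get? c = some ((offs s c + p.count c : Nat) : Int)) →
    (r.foldl (fun (q : List Int × PySem.Dict Char Int) c =>
        match q.2.get? c with
        | none => q
        | some v => (q.1 ++ [v], q.2.insert c (v + 1)))
      (acc, d)).1
    = acc ++ ranksAux s p r := by
  intro r
  induction r with
  | nil => intro p acc d _; simp [ranksAux]
  | cons c₀ r' ih =>
    intro p acc d hd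
    rw [List.foldl_cons]
    have h0 := hd c₀ List.mem_cons_self
    rw [show (match d.get? c₀ with
        | none => (acc, d)
        | some v => (acc ++ [v], d.insert c₀ (v + 1)))
      = (acc ++ [((offs s c₀ + p.count c₀ : Nat) : Int)],
          d.insert c₀ (((offs s c₀ + p.count c₀ : Nat) : Int) + 1)) by rw [h0]]
    rw [ih (p ++ [c₀]) _ _ (by
      intro c hc
      by_cases hcc : c = c₀
      · subst hcc
        rw [PySem.Dict.get?_insert_self]
        have : (p ++ [c]).count c = p.count c + 1 := by simp [List.count_append]
        rw [this]
        push_cast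
        ring_nf
      · rw [PySem.Dict.get?_insert_of_ne _ _ hcc, hd c (List.mem_cons_of_mem _ hc)]
        have : (p ++ [c₀]).count c = p.count c := by
          simp [List.count_append, List.count_singleton, beq_false_of_ne (fun h => hcc h.symm)]
        rw [this])]
    rw [ranksAux]
    simp [List.append_assoc]

-- B's count dict is the letter counter of the key
lemma cntB_eq (s : List Char) :
    s.foldl (fun d c => if PySem.Chars.isalpha c then d.insert c (d.getD c 0 + 1) else d)
      (PySem.Dict.empty : PySem.Dict Char Int)
    = PySem.Dict.counter (s.filter PySem.Chars.isalpha) := by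
  rw [PySem.List.foldl_if_eq_foldl_filter,
    PySem.Dict.foldl_insert_getD_add_one_eq_counter]

lemma cntB_getD (s : List Char) (c : Char) (hc : c ∈ pyAlphabet) :
    (PySem.Dict.counter (s.filter PySem.Chars.isalpha)).getD c 0 = ((s.count c : Nat) : Int) := by
  rw [PySem.Dict.getD_counter, List.count_filter (mem_alpha_isalpha c hc)]

-- offs with Int-valued counts, as B's prefix sums produce it
lemma offs_cast (s : List Char) (c : Char) :
    ((pyAlphabet.takeWhile (fun a => a != c)).map
        (fun a => ((PySem.Dict.counter (s.filter PySem.Chars.isalpha)).getD a 0))).sum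
      = ((offs s c : Nat) : Int) := by
  rw [List.map_congr_left (g := fun a => ((s.count a : Nat) : Int))
    (fun a ha => cntB_getD s a ((List.takeWhile_sublist _).mem ha))]
  rw [offs, Nat.cast_list_sum, List.map_map]
  rfl

-- B's running total is the number of key letters
lemma total_eq (s : List Char) (hiff : ∀ c ∈ s, decide (c ∈ pyAlphabet) = PySem.Chars.isalpha c) :
    (pyAlphabet.foldl (fun (p : PySem.Dict Char Int × Int) c =>
        (p.1.insert c p.2, p.2 + (PySem.Dict.counter (s.filter PySem.Chars.isalpha)).getD c 0))
      ((PySem.Dict.empty : PySem.Dict Char Int), 0)).2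
    = (((s.filter PySem.Chars.isalpha).length : Nat) : Int) := by
  rw [startFold_snd, List.map_congr_left (g := fun a => ((s.count a : Nat) : Int))
    (fun a ha => cntB_getD s a ha)]
  rw [zero_add, show (pyAlphabet.map fun a => ((s.count a : Nat) : Int))
      = (pyAlphabet.map fun a => s.count a).map Nat.cast by rw [List.map_map]; rfl,
    ← Nat.cast_list_sum, sum_count s, List.filter_congr hiff]

-- ----- assembly -----

lemma alt_eq_ranks (s : List Char) (hiff : ∀ c ∈ s, decide (c ∈ pyAlphabet) = PySem.Chars.isalpha c)
    (hpre : (s.take (s.filter PySem.Chars.isalpha).length).all PySem.Chars.isalpha = true) :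
    ((PySem.List.slice s none (some ((pyAlphabet.foldl (fun (p : PySem.Dict Char Int × Int) c =>
        (p.1.insert c p.2, p.2 + (s.foldl (fun d c => if PySem.Chars.isalpha c then d.insert c (d.getD c 0 + 1) else d)
          (PySem.Dict.empty : PySem.Dict Char Int)).getD c 0))
      ((PySem.Dict.empty : PySem.Dict Char Int), 0)).2))).foldl
      (fun (q : List Int × PySem.Dict Char Int) c =>
        match q.2.get? c with
        | none => q
        | some v => (q.1 ++ [v], q.2.insert c (v + 1)))
      ([], (pyAlphabet.foldl (fun (p : PySem.Dict Char Int × Int) c =>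
        (p.1.insert c p.2, p.2 + (s.foldl (fun d c => if PySem.Chars.isalpha c then d.insert c (d.getD c 0 + 1) else d)
          (PySem.Dict.empty : PySem.Dict Char Int)).getD c 0))
      ((PySem.Dict.empty : PySem.Dict Char Int), 0)).1)).1
    = ranksAux s [] (s.take (s.filter PySem.Chars.isalpha).length) := by
  rw [cntB_eq s, total_eq s hiff, PySem.List.slice_to_natCast]
  refine loopB s (s.take (s.filter PySem.Chars.isalpha).length) [] [] _ ?_
  intro c hc
  have hcal : PySem.Chars.isalpha c = true := List.all_eq_true.mp hpre c hc
  have hcs : c ∈ s := List.mem_of_mem_take hc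
  have hcA : c ∈ pyAlphabet := of_decide_eq_true ((hiff c hcs).symm ▸ hcal)
  rw [startFold _ pyAlphabet pyAlphabet_nodup c hcA, offs_cast s c]
  simp

lemma a_eq_ranks (s : List Char) (hiff : ∀ c ∈ s, decide (c ∈ pyAlphabet) = PySem.Chars.isalpha c)
    (hpre : (s.take (s.filter PySem.Chars.isalpha).length).all PySem.Chars.isalpha = true) :
    (((List.range ((pyAlphabet.foldl (fun ch c =>
          s.foldl (fun ch i => if i == c then ch ++ [i] else ch) ch) []).length)).foldl
      (fun (st : Option (List Int × List Char)) (k : Nat) =>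
        st.bind fun q =>
          match PySem.List.pyGet? s (k : Int) with
          | none => none
          | some c =>
            match PySem.List.index? q.2 c with
            | none => none
            | some j => some (q.1 ++ [(j : Int)], replace1 q.2 c '#'))
      (some (([] : List Int), pyAlphabet.foldl (fun ch c =>
          s.foldl (fun ch i => if i == c then ch ++ [i] else ch) ch) []))).map (·.1)).getD []
    = ranksAux s [] (s.take (s.filter PySem.Chars.isalpha).length) := by
  rw [ch0_eq s, mask_nil_length s hiff, List.range_eq_range']
  have hlen : (s.take (s.filter PySem.Chars.isalpha).length).length
      = (s.filter PySem.Chars.isalpha).length := by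
    rw [List.length_take]
    exact Nat.min_eq_left (List.length_filter_le _ _)
  have hr : ∀ c ∈ s.take (s.filter PySem.Chars.isalpha).length, c ∈ pyAlphabet := by
    intro c hc
    have hcal : PySem.Chars.isalpha c = true := List.all_eq_true.mp hpre c hc
    exact of_decide_eq_true ((hiff c (List.mem_of_mem_take hc)).symm ▸ hcal)
  have := loopA s (s.take (s.filter PySem.Chars.isalpha).length)
    [] (s.drop (s.filter PySem.Chars.isalpha).length) []
    (by simp) hr
  rw [List.length_nil, hlen] at this
  rw [this]
  rfl

-- ===== VERDICT (by name: the statement is the Claim_ definition above) =====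
theorem getTransposition_spec : Claim_equal_getTransposition := by
  intro cle _ hpre
  unfold Spec_getTransposition
  simp only [getTransposition, getTransposition_alt]
  have hiff : ∀ c ∈ PySem.Chars.lower cle.toList,
      decide (c ∈ pyAlphabet) = PySem.Chars.isalpha c := by
    intro c hc
    rw [PySem.Chars.lower, List.mem_map] at hc
    obtain ⟨c', hc', rfl⟩ := hc
    by_cases ha : PySem.Chars.isalpha (PySem.Chars.lowerChar c') = true
    · rw [ha, decide_eq_true_eq]
      exact lowerChar_mem_alpha c' ha
    · rw [Bool.not_eq_true] at ha
      rw [ha, decide_eq_false_iff_not]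
      intro hmem
      exact absurd (mem_alpha_isalpha _ hmem) (by rw [ha]; simp)
  rw [a_eq_ranks _ hiff hpre, alt_eq_ranks _ hiff hpre]
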